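-- pv_equiv track=rewrite | github.com/semgrep/mcp | scripts/configure_semgrep_mcp.py | _create_safe_cmd_display
-- ===== SOURCE A (Python) =====
-- def _create_safe_cmd_display(claude_cmd: list[str]) -> list[str]:
--     """Create safe command display that masks sensitive values."""
--     safe_cmd = []
--     skip_next = False
--     for arg in claude_cmd:
--         if skip_next:
--             safe_cmd.append("***")
--             skip_next = False
--         elif arg == "-e":
--             safe_cmd.append(arg)
--             skip_next = True
--         else:
--             safe_cmd.append(arg)
--     return safe_cmd
-- ===== SOURCE B (Python) =====
-- def _create_safe_cmd_display(claude_cmd: list[str]) -> list[str]: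
--     """Create safe command display that masks sensitive values."""
--     safe_cmd = []
--     i = 0
--     n = len(claude_cmd)
--     while i < n:
--         if claude_cmd[i] == "-e":
--             safe_cmd.append("-e")
--             if i + 1 < n:
--                 safe_cmd.append("***")
--             i += 2
--         else:
--             safe_cmd.append(claude_cmd[i])
--             i += 1
--     return safe_cmd
-- ===== Notes on version B (the rewrite author's own statement) =====
-- stated objective: alternative
-- what changed: Replaces the per-element skip_next boolean state machine with an index-driven while-loop that consumes each '-e' flag and its masked value as one unit (advancing by 2), appending '***' only when a value actually follows.
import Mathlib
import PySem

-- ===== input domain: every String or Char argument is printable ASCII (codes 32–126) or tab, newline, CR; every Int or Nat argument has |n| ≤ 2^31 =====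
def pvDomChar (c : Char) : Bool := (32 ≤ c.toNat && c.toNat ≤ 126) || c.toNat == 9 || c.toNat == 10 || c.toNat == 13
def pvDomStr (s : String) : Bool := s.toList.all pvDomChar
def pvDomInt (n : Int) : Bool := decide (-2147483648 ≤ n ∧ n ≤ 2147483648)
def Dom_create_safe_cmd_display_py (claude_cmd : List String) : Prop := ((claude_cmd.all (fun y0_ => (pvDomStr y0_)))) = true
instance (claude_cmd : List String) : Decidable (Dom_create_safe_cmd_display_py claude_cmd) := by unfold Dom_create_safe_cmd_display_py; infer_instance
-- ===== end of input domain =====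

-- B replaces A's skip_next boolean state machine by an index-driven loop consuming each "-e" flag and its value as one unit; same output, no speed claim.


-- ===== PORT A =====
-- literal port of A: fold over the arguments threading (safe_cmd, skip_next)
def create_safe_cmd_display_py (claude_cmd : List String) : List String :=
  (claude_cmd.foldl
    (fun (st : List String × Bool) arg =>
      if st.2 then (st.1 ++ ["***"], false)
      else if arg = "-e" then (st.1 ++ [arg], true)
      else (st.1 ++ [arg], false))
    ([], false)).1

-- ===== PORT B =====
-- literal port of B: the while-loop over the index, consuming "-e" plus its value in one step
def create_safe_cmd_display_py_alt_go (l : List String) : List String :=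
  match l with
  | [] => []
  | a :: rest =>
    if a = "-e" then
      match rest with
      | [] => ["-e"]
      | _ :: rest' => "-e" :: "***" :: create_safe_cmd_display_py_alt_go rest'
    else a :: create_safe_cmd_display_py_alt_go rest

def create_safe_cmd_display_py_alt (claude_cmd : List String) : List String :=
  create_safe_cmd_display_py_alt_go claude_cmd

-- ===== PRECONDITION & SPEC =====
def Spec_create_safe_cmd_display_py (claude_cmd : List String) (out : List String) : Prop := out = create_safe_cmd_display_py_alt claude_cmd
instance (claude_cmd : List String) (out : List String) : Decidable (Spec_create_safe_cmd_display_py claude_cmd out) := by unfold Spec_create_safe_cmd_display_py; infer_instance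

-- ===== CLAIM (what is proved, stated in full; the proofs are below) =====
def Claim_equal_create_safe_cmd_display_py : Prop := ∀ (claude_cmd : List String), Dom_create_safe_cmd_display_py claude_cmd → Spec_create_safe_cmd_display_py claude_cmd (create_safe_cmd_display_py claude_cmd)

-- ===== LEMMAS AND PROOFS =====

-- A's loop, written as structural recursion on the remaining arguments (proof helper)
def goA (l : List String) (skip : Bool) : List String :=
  match l with
  | [] => []
  | a :: rest =>
    if skip then "***" :: goA rest false
    else if a = "-e" then a :: goA rest true
    else a :: goA rest false

theorem foldl_eq_goA (l : List String) (acc : List String) (skip : Bool) :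
    (l.foldl
      (fun (st : List String × Bool) arg =>
        if st.2 then (st.1 ++ ["***"], false)
        else if arg = "-e" then (st.1 ++ [arg], true)
        else (st.1 ++ [arg], false))
      (acc, skip)).1 = acc ++ goA l skip := by
  induction l generalizing acc skip with
  | nil => simp [goA]
  | cons a rest ih =>
    cases skip with
    | true => simp [goA, List.foldl_cons, ih]
    | false =>
      by_cases h : a = "-e" <;> simp [goA, List.foldl_cons, h, ih]

theorem goA_eq_goB (l : List String) :
    goA l false = create_safe_cmd_display_py_alt_go l := by
  induction l using create_safe_cmd_display_py_alt_go.induct with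
  | case1 => rfl
  | case2 => simp [goA, create_safe_cmd_display_py_alt_go]
  | case3 a rest' ih => simp [goA, create_safe_cmd_display_py_alt_go]; exact ih
  | case4 a rest h ih => rw [create_safe_cmd_display_py_alt_go.eq_def]; simp [goA, h, ih]

-- ===== VERDICT (by name: the statement is the Claim_ definition above) =====
theorem create_safe_cmd_display_py_spec : Claim_equal_create_safe_cmd_display_py := by
  intro l _
  show create_safe_cmd_display_py l = create_safe_cmd_display_py_alt l
  rw [create_safe_cmd_display_py, foldl_eq_goA, List.nil_append, goA_eq_goB]
  rfl
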